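-- pv_equiv track=rewrite | github.com/kkkparty/Aibert_learn_repo | cursor_skills/source_code_learn_skill/scripts/mermaid_full_pipeline.py | extract_mermaid_blocks
-- ===== SOURCE A (Python) =====
-- from typing import List, Tuple
--
-- def extract_mermaid_blocks(content: str) -> List[Tuple[str, str, int]]:
--     """提取 Mermaid 代码块"""
--     blocks = []
--     lines = content.split('\n')
--     i = 0
--     while i < len(lines):
--         if lines[i].strip().startswith('```mermaid'):
--             title = "diagram"
--             for j in range(i - 1, max(0, i - 10), -1):
--                 if lines[j].strip().startswith('#'):
--                     title = lines[j].strip().lstrip('#').strip()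
--                     break
--             i += 1
--             mermaid_lines = []
--             start_line = i
--             while i < len(lines) and not lines[i].strip().startswith('```'):
--                 mermaid_lines.append(lines[i])
--                 i += 1
--             mermaid_code = '\n'.join(mermaid_lines)
--             blocks.append((title, mermaid_code, start_line))
--         i += 1
--     return blocks
-- ===== SOURCE B (Python) =====
-- from typing import List, Tuple
--
--
-- def _title_for(lines, i):
--     for j in range(i - 1, max(0, i - 10), -1):
--         if lines[j].strip().startswith('#'):
--             return lines[j].strip().lstrip('#').strip()
--     return "diagram"
--
--
-- def extract_mermaid_blocks(content: str) -> List[Tuple[str, str, int]]: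
--     """提取 Mermaid 代码块"""
--     lines = content.split('\n')
--     # staged: first collect the indices of ALL fence lines, then pair them up
--     fences = [i for i, l in enumerate(lines) if l.strip().startswith('```')]
--     blocks = []
--     k = 0
--     while k < len(fences):
--         i = fences[k]
--         if not lines[i].strip().startswith('```mermaid'):
--             k += 1
--             continue
--         if k + 1 < len(fences):
--             close = fences[k + 1]
--             k += 2
--         else:
--             close = len(lines)
--             k += 1
--         blocks.append((_title_for(lines, i), '\n'.join(lines[i + 1:close]), i + 1))
--     return blocks
-- ===== Notes on version B (the rewrite author's own statement) =====
-- stated objective: alternative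
-- what changed: Instead of A's nested while/while index scan, B first collects the indices of ALL fence lines in one comprehension, then pairs each ```mermaid fence with the next fence (or end of file) and slices the line list between them; the title window scan is kept verbatim as a helper.
import Mathlib
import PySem

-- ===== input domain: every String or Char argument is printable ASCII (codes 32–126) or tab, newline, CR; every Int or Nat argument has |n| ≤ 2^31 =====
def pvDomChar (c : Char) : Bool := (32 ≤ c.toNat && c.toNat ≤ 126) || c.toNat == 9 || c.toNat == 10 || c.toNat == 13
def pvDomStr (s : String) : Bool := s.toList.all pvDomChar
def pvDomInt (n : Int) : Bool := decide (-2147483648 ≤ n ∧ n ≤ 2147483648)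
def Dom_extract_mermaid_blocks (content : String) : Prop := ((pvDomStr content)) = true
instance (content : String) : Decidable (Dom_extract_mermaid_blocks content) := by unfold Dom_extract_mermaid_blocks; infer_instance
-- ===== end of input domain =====

-- B replaces A's nested while/while index scan by a staged algorithm: collect all fence-line
-- indices once, then pair each ```mermaid fence with the next fence and slice between them;
-- same return value on every input (alternative decomposition).

-- ===== PORT A =====

-- s.lstrip('#') ported by hand as dropWhile on the char list (exact: lstrip with an explicit
-- char set drops exactly the leading characters from that set).
def pvLstripHash (s : String) : String := String.ofList (s.toList.dropWhile (fun c => c == '#'))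

-- A's title loop: 'for j in range(i-1, max(0,i-10), -1): if lines[j].strip().startswith("#"): title = …; break'
-- lines[j] is always in range here (0 ≤ j < i < len); the .getD "" default is never used.
def pvTitleLoopA (lines : List String) : List Int → String
  | [] => "diagram"
  | j :: js =>
    if PySem.Str.startswith (PySem.Str.strip ((PySem.List.pyGet? lines j).getD "")) "#" then
      PySem.Str.strip (pvLstripHash (PySem.Str.strip ((PySem.List.pyGet? lines j).getD "")))
    else pvTitleLoopA lines js

-- A's inner while: collect lines until one whose strip() starts with '```'; returns
-- (mermaid_lines, remaining suffix starting at the closing fence, or [] if none).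
def pvCollectA : List String → List String × List String
  | [] => ([], [])
  | l :: rest =>
    if !PySem.Str.startswith (PySem.Str.strip l) "```" then
      let r := pvCollectA rest
      (l :: r.1, r.2)
    else ([], l :: rest)

-- termination lemma for pvLoopA (the outer while resumes after the closing fence)
theorem pvCollectA_len_le (xs : List String) : (pvCollectA xs).2.length ≤ xs.length := by
  induction xs with
  | nil => simp [pvCollectA]
  | cons l rest ih =>
    simp only [pvCollectA]
    split
    · simpa using Nat.le_succ_of_le ih
    · simp

-- A's outer while over index i; the suffix 'lines.drop i' is carried explicitly.
def pvLoopA (lines : List String) (i : Nat) (suf : List String)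
    (blocks : List (String × String × Int)) : List (String × String × Int) :=
  match suf with
  | [] => blocks
  | l :: rest =>
    if PySem.Str.startswith (PySem.Str.strip l) "```mermaid" then
      let title := pvTitleLoopA lines (PySem.List.pyRange ((i : Int) - 1) (max 0 ((i : Int) - 10)) (-1))
      let start : Int := (i : Int) + 1
      let r := pvCollectA rest
      let code := PySem.Str.join "\n" r.1
      let blocks' := blocks ++ [(title, code, start)]
      if h : r.2 = [] then blocks'
      else pvLoopA lines (i + 1 + r.1.length + 1) r.2.tail blocks'
    else pvLoopA lines (i + 1) rest blocks
termination_by suf.length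
decreasing_by
  · have h1 := pvCollectA_len_le rest
    simp only [List.length_tail, List.length_cons]
    omega
  · simp

def extract_mermaid_blocks (content : String) : List (String × String × Int) :=
  -- content.split('\n'): split? is none only for an empty separator, so .getD [] is exact
  let lines := (PySem.Str.split? content "\n").getD []
  pvLoopA lines 0 lines []

-- ===== PORT B =====

-- B's _title_for helper (same bounded backward window, early return)
def pvTitleLoopB (lines : List String) : List Int → String
  | [] => "diagram"
  | j :: js =>
    if PySem.Str.startswith (PySem.Str.strip ((PySem.List.pyGet? lines j).getD "")) "#" then
      PySem.Str.strip (pvLstripHash (PySem.Str.strip ((PySem.List.pyGet? lines j).getD "")))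
    else pvTitleLoopB lines js

def pvTitleForB (lines : List String) (i : Int) : String :=
  pvTitleLoopB lines (PySem.List.pyRange (i - 1) (max 0 (i - 10)) (-1))

-- B's while loop over the fence-index list: consume one index (non-mermaid fence) or two
-- (opener + its closer); an opener with no following fence closes at len(lines).
def pvPairB (lines : List String) : List Int → List (String × String × Int)
  | [] => []
  | i :: ks =>
    if !PySem.Str.startswith (PySem.Str.strip ((PySem.List.pyGet? lines i).getD "")) "```mermaid" then
      pvPairB lines ks
    else
      match ks with
      | c :: ks' =>
        (pvTitleForB lines i, PySem.Str.join "\n" (PySem.List.slice lines (some (i + 1)) (some c)), i + 1)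
          :: pvPairB lines ks'
      | [] =>
        [(pvTitleForB lines i,
          PySem.Str.join "\n" (PySem.List.slice lines (some (i + 1)) (some (lines.length : Int))), i + 1)]
termination_by ks => ks.length
decreasing_by
  · simp
  · simp

def extract_mermaid_blocks_alt (content : String) : List (String × String × Int) :=
  let lines := (PySem.Str.split? content "\n").getD []
  -- fences = [i for i, l in enumerate(lines) if l.strip().startswith('```')]
  let fences := ((PySem.List.enumerate lines 0).filter
      (fun p => PySem.Str.startswith (PySem.Str.strip p.2) "```")).map (·.1)
  pvPairB lines fences

-- ===== PRECONDITION & SPEC =====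
def Spec_extract_mermaid_blocks (content : String) (out : List (String × String × Int)) : Prop := out = extract_mermaid_blocks_alt content
instance (content : String) (out : List (String × String × Int)) : Decidable (Spec_extract_mermaid_blocks content out) := by unfold Spec_extract_mermaid_blocks; infer_instance

-- ===== CLAIM (what is proved, stated in full; the proofs are below) =====
def Claim_equal_extract_mermaid_blocks : Prop := ∀ (content : String), Dom_extract_mermaid_blocks content → Spec_extract_mermaid_blocks content (extract_mermaid_blocks content)

-- ===== LEMMAS AND PROOFS =====

-- recursive characterisation of B's fence-index comprehension
def pvFencesOf (xs : List String) (i : Int) : List Int :=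
  match xs with
  | [] => []
  | l :: rest =>
    if PySem.Str.startswith (PySem.Str.strip l) "```" then i :: pvFencesOf rest (i + 1)
    else pvFencesOf rest (i + 1)

theorem pvFences_eq (xs : List String) : ∀ (k : Int),
    ((PySem.List.enumerate xs k).filter
        (fun p => PySem.Str.startswith (PySem.Str.strip p.2) "```")).map (·.1)
      = pvFencesOf xs k := by
  induction xs with
  | nil => intro k; simp [pvFencesOf, PySem.List.enumerate_nil]
  | cons l rest ih =>
    intro k
    rw [PySem.List.enumerate_cons]
    simp only [List.filter_cons, pvFencesOf]
    split <;> simp_all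

-- the two title scans are the same computation
theorem pvTitle_eq (lines : List String) : ∀ js, pvTitleLoopA lines js = pvTitleLoopB lines js := by
  intro js
  induction js with
  | nil => rfl
  | cons j js ih => simp only [pvTitleLoopA, pvTitleLoopB, ih]

-- a '```mermaid' line is in particular a '```' fence line
theorem pvMermaid_fence (s : String) :
    PySem.Str.startswith s "```mermaid" = true → PySem.Str.startswith s "```" = true := by
  intro h
  simp at h ⊢
  rw [PySem.Chars.startswith_iff] at h ⊢
  exact List.IsPrefix.trans (by decide) h

-- pvCollectA splits at the first fence line
theorem pvCollectA_eq (xs : List String) :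
    pvCollectA xs
      = (xs.takeWhile (fun l => !PySem.Str.startswith (PySem.Str.strip l) "```"),
         xs.dropWhile (fun l => !PySem.Str.startswith (PySem.Str.strip l) "```")) := by
  induction xs with
  | nil => rfl
  | cons l rest ih =>
    simp only [pvCollectA, List.takeWhile_cons, List.dropWhile_cons]
    split <;> simp_all

-- pvFencesOf in terms of pvCollectA's split
theorem pvFencesOf_collect (xs : List String) : ∀ (i : Int),
    pvFencesOf xs i
      = match (pvCollectA xs).2 with
        | [] => []
        | _ :: tl => (i + (pvCollectA xs).1.length) :: pvFencesOf tl (i + (pvCollectA xs).1.length + 1) := by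
  induction xs with
  | nil => intro i; simp [pvFencesOf, pvCollectA]
  | cons l rest ih =>
    intro i
    simp only [pvFencesOf, pvCollectA]
    cases hf : PySem.Str.startswith (PySem.Str.strip l) "```" with
    | true => simp
    | false =>
      simp only [Bool.not_false, if_pos, Bool.false_eq_true, if_neg, not_false_eq_true]
      rw [ih (i + 1)]
      cases hr : (pvCollectA rest).2 with
      | nil => simp
      | cons c tl =>
        simp only [List.length_cons]
        have h1 : i + 1 + ((pvCollectA rest).1.length : Int)
            = i + (((pvCollectA rest).1.length : Int) + 1) := by ring
        rw [h1]
        norm_num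

-- equation-shaped helpers for pvPairB (well-founded recursion blocks plain 'rw [pvPairB]')
theorem pvPairB_skip (lines : List String) (i : Int) (ks : List Int)
    (h : (!PySem.Str.startswith (PySem.Str.strip ((PySem.List.pyGet? lines i).getD "")) "```mermaid") = true) :
    pvPairB lines (i :: ks) = pvPairB lines ks := by
  simp at h
  rw [pvPairB.eq_def]; simp [h]

theorem pvPairB_last (lines : List String) (i : Int)
    (h : PySem.Str.startswith (PySem.Str.strip ((PySem.List.pyGet? lines i).getD "")) "```mermaid" = true) :
    pvPairB lines [i]
      = [(pvTitleForB lines i,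
          PySem.Str.join "\n" (PySem.List.slice lines (some (i + 1)) (some (lines.length : Int))), i + 1)] := by
  simp at h
  rw [pvPairB.eq_def]; simp [h]

theorem pvPairB_pair (lines : List String) (i c : Int) (ks' : List Int)
    (h : PySem.Str.startswith (PySem.Str.strip ((PySem.List.pyGet? lines i).getD "")) "```mermaid" = true) :
    pvPairB lines (i :: c :: ks')
      = (pvTitleForB lines i, PySem.Str.join "\n" (PySem.List.slice lines (some (i + 1)) (some c)), i + 1)
          :: pvPairB lines ks' := by
  simp at h
  rw [pvPairB.eq_def]; simp [h]

-- main induction: A's outer loop = B's pairing of the suffix's fence list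
theorem pvMain_eq (lines : List String) :
    ∀ (n : Nat) (suf : List String) (i : Nat) (blocks : List (String × String × Int)),
      suf.length ≤ n → lines.drop i = suf →
      pvLoopA lines i suf blocks = blocks ++ pvPairB lines (pvFencesOf suf (i : Int)) := by
  intro n
  induction n with
  | zero =>
    intro suf i blocks h hdrop
    have : suf = [] := List.length_eq_zero_iff.mp (Nat.le_zero.mp h)
    subst this
    simp [pvLoopA, pvFencesOf, pvPairB]
  | succ n ih =>
    intro suf i blocks h hdrop
    match suf with
    | [] => simp [pvLoopA, pvFencesOf, pvPairB]
    | l :: rest =>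
      have hgetl : PySem.List.pyGet? lines (i : Int) = some l := by
        rw [PySem.List.pyGet?_natCast]
        have h0 := congrArg (fun xs => xs[0]?) hdrop
        simpa using h0
      have hrest : lines.drop (i + 1) = rest := by
        have h0 := congrArg (List.drop 1) hdrop
        simpa [Nat.add_comm] using h0
      cases hop : PySem.Str.startswith (PySem.Str.strip l) "```mermaid" with
      | false =>
        -- A skips; B either skips a non-mermaid fence or the line is no fence at all
        have hA : pvLoopA lines i (l :: rest) blocks = pvLoopA lines (i + 1) rest blocks := by
          rw [pvLoopA, if_neg (by simp only [hop]; simp)]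
        rw [hA, ih rest (i + 1) blocks (by simpa using Nat.le_of_succ_le_succ h) hrest]
        simp only [pvFencesOf]
        cases hf : PySem.Str.startswith (PySem.Str.strip l) "```" with
        | false => rw [if_neg (by simp)]; push_cast; ring_nf
        | true =>
          rw [if_pos rfl]
          rw [pvPairB_skip lines _ _ (by simp only [hgetl, Option.getD_some]; simpa using hop)]
          push_cast; ring_nf
      | true =>
        have hf : PySem.Str.startswith (PySem.Str.strip l) "```" = true := pvMermaid_fence _ hop
        rw [pvLoopA]
        rw [if_pos hop]
        simp only
        rw [pvFencesOf, if_pos hf]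
        rw [pvFencesOf_collect rest ((i : Int) + 1)]
        have htitle : pvTitleLoopA lines (PySem.List.pyRange ((i : Int) - 1) (max 0 ((i : Int) - 10)) (-1))
            = pvTitleForB lines (i : Int) := by
          rw [pvTitleForB, pvTitle_eq]
        cases hr2 : (pvCollectA rest).2 with
        | nil =>
          -- unterminated block: closes at len(lines)
          rw [dif_pos rfl, pvPairB_last lines _ (by simp only [hgetl, Option.getD_some]; exact hop)]
          have hr1 : (pvCollectA rest).1 = rest := by
            have h0 := List.takeWhile_append_dropWhile
              (p := fun l => !PySem.Str.startswith (PySem.Str.strip l) "```") (l := rest)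
            simp only [pvCollectA_eq] at hr2 ⊢
            rw [hr2, List.append_nil] at h0
            exact h0
          have hslice : PySem.List.slice lines (some ((i : Int) + 1)) (some (lines.length : Int))
              = rest := by
            have h1 : (i : Int) + 1 = ((i + 1 : Nat) : Int) := by push_cast; ring
            rw [h1, PySem.List.slice_natCast, hrest]
            have hld : (List.drop (i + 1) lines).length = lines.length - (i + 1) := by simp
            rw [hrest] at hld
            exact List.take_of_length_le (by omega)
          rw [hslice, hr1, htitle]
        | cons c tl =>
          rw [dif_neg (by simp), pvPairB_pair lines _ _ _ (by simp only [hgetl, Option.getD_some]; exact hop)]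
          have hm : (pvCollectA rest).1 ++ (pvCollectA rest).2 = rest := by
            rw [pvCollectA_eq]; exact List.takeWhile_append_dropWhile
          obtain ⟨a, ha⟩ : ∃ a, (pvCollectA rest).1 = a := ⟨_, rfl⟩
          rw [ha] at hm ⊢
          rw [hr2] at hm
          have h2 : a.length + (tl.length + 1) = rest.length := by rw [← hm]; simp
          have hdrop2 : lines.drop (i + 1 + a.length) = c :: tl := by
            have h0 := congrArg (List.drop a.length) hrest
            rw [← hm, List.drop_left] at h0
            rw [← h0]; simp [Nat.add_comm]
          have hslice : PySem.List.slice lines (some ((i : Int) + 1))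
              (some ((i : Int) + 1 + (a.length : Int))) = a := by
            have h1 : (i : Int) + 1 = ((i + 1 : Nat) : Int) := by push_cast; ring
            rw [h1, PySem.List.slice_natCast_add, hrest, ← hm, List.take_left]
          have hdrop3 : lines.drop (i + 1 + a.length + 1) = tl := by
            have h0 := congrArg (List.drop 1) hdrop2
            simpa [Nat.add_comm] using h0
          simp only [List.tail_cons]
          rw [ih tl (i + 1 + a.length + 1) _ (by simp only [List.length_cons] at h; omega) hdrop3]
          rw [hslice, htitle]
          have hcast : (((i + 1 + a.length + 1 : Nat)) : Int)
              = (i : Int) + 1 + (a.length : Int) + 1 := by push_cast; ring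
          rw [hcast]
          simp

-- ===== VERDICT (by name: the statement is the Claim_ definition above) =====
theorem extract_mermaid_blocks_spec : Claim_equal_extract_mermaid_blocks := by
  intro content _
  unfold Spec_extract_mermaid_blocks extract_mermaid_blocks extract_mermaid_blocks_alt
  simp only
  rw [pvFences_eq]
  have := pvMain_eq ((PySem.Str.split? content "\n").getD [])
    ((PySem.Str.split? content "\n").getD []).length
    ((PySem.Str.split? content "\n").getD []) 0 [] (le_refl _) (by simp)
  simpa using this
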